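-- pv_equiv track=rewrite | github.com/mmkar5/Missing_Residue_Finder_fromPDB | PDB_Missing_Residue_unique.py | unique_chain_missing_res
-- ===== SOURCE A (Python) =====
-- def unique_chain_missing_res(missing_res_dict):
--     """Returns a dictionary of [Chains:missing_res_information], where the chains having same missing_res and sequence are combined.
--     missing_res_dict= [Chains:missing_res_information] as input
--     """
--     combined_dict = {}
--     for chain, missing_res in missing_res_dict.items():
--         if missing_res not in combined_dict.values():
--             combined_dict[chain] = missing_res
--         else:
--             key = [k for k, v in combined_dict.items() if v == missing_res][0]
--             combined_dict[key + "," + chain] = combined_dict.pop(key)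
--     return combined_dict
-- ===== SOURCE B (Python) =====
-- def unique_chain_missing_res(missing_res_dict):
--     """Returns a dictionary of [Chains:missing_res_information], where the chains having same missing_res and sequence are combined.
--     missing_res_dict= [Chains:missing_res_information] as input
--     """
--     # One pass grouping chains by their missing_res value; a repeated value moves
--     # its group to the end (pop + reinsert), matching the original's key dynamics.
--     groups = {}
--     for chain, missing_res in missing_res_dict.items():
--         groups[missing_res] = groups.pop(missing_res, []) + [chain]
--     return {",".join(chains): missing_res for missing_res, chains in groups.items()}
-- ===== Notes on version B (the rewrite author's own statement) =====
-- stated objective: faster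
-- what changed: Instead of scanning combined_dict.values() and re-scanning its items for the matching key on every element (O(n) inner passes), B makes one pass building a dict keyed by the missing_res value (pop+reinsert preserves the move-to-end order) and joins each chain group once at the end.
import Mathlib
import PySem

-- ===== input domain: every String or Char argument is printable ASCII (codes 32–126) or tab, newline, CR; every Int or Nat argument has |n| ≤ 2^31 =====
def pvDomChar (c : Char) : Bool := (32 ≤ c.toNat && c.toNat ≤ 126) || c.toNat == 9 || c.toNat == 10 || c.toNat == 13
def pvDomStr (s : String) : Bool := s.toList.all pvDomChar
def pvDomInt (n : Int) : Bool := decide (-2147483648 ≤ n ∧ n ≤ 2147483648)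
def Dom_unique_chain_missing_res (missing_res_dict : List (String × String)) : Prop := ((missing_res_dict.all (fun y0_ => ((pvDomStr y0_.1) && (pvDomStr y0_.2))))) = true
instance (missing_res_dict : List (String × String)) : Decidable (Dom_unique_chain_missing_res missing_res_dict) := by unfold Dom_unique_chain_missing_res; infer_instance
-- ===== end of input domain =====

-- B replaces A's per-element scans of combined_dict (values membership + items scan for the
-- matching key) by a single pass grouping chains per value in a dict (pop+reinsert keeps the
-- move-to-end order), joining each group once at the end: O(n) dict operations instead of O(n^2).


-- ===== PORT A =====
-- one loop iteration of A: values-membership test, then either plain insert or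
-- "find first key with this value, pop it, reinsert merged key at the end"
def ucmrStepA (d : PySem.Dict String String) (p : String × String) : PySem.Dict String String :=
  if p.2 ∈ d.values then
    match (d.items.filter (fun q => q.2 == p.2)).head? with
    | some q =>
      match d.pop? q.1 with
      | some (v, d') => d'.insert (q.1 ++ "," ++ p.1) v
      | none => d      -- unreachable: q.1 is a key of d
    | none => d        -- unreachable: the filtered list is nonempty when p.2 ∈ d.values
  else d.insert p.1 p.2

def unique_chain_missing_res (missing_res_dict : List (String × String)) : List (String × String) :=
  (missing_res_dict.foldl ucmrStepA PySem.Dict.empty).items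

-- ===== PORT B =====
-- one loop iteration of B: groups[v] = groups.pop(v, []) + [chain]
def ucmrStepB (g : PySem.Dict String (List String)) (p : String × String) : PySem.Dict String (List String) :=
  (g.erase p.2).insert p.2 (g.getD p.2 [] ++ [p.1])

def unique_chain_missing_res_alt (missing_res_dict : List (String × String)) : List (String × String) :=
  let groups := missing_res_dict.foldl ucmrStepB PySem.Dict.empty
  -- {",".join(chains): missing_res for missing_res, chains in groups.items()}
  (groups.items.foldl (fun d q => d.insert (PySem.Str.join "," q.2) q.1) PySem.Dict.empty).items

-- ===== PRECONDITION & SPEC =====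
-- Pre_ excludes inputs where some chain name contains ',' (the merged-key separator) AND two
-- chains share a missing_res value: only there the merged-key encoding is ambiguous and A can
-- silently overwrite and drop an unrelated entry. It also excludes association lists with
-- duplicate keys, which do not represent a Python dict.
def Pre_unique_chain_missing_res (missing_res_dict : List (String × String)) : Prop :=
  (missing_res_dict.map Prod.fst).Nodup ∧
  ((∀ p ∈ missing_res_dict, ',' ∉ p.1.toList) ∨ (missing_res_dict.map Prod.snd).Nodup)
instance (missing_res_dict : List (String × String)) : Decidable (Pre_unique_chain_missing_res missing_res_dict) := by unfold Pre_unique_chain_missing_res; infer_instance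

def pvWitness_unique_chain_missing_res : (List (String × String)) :=
  [("A", "12-15"), ("B", "12-15"), ("C", "7")]

def Spec_unique_chain_missing_res (missing_res_dict : List (String × String)) (out : List (String × String)) : Prop := out = unique_chain_missing_res_alt missing_res_dict
instance (missing_res_dict : List (String × String)) (out : List (String × String)) : Decidable (Spec_unique_chain_missing_res missing_res_dict out) := by unfold Spec_unique_chain_missing_res; infer_instance

-- ===== CLAIM (what is proved, stated in full; the proofs are below) =====
def Claim_equal_unique_chain_missing_res : Prop := ∀ (missing_res_dict : List (String × String)), Dom_unique_chain_missing_res missing_res_dict → Pre_unique_chain_missing_res missing_res_dict → Spec_unique_chain_missing_res missing_res_dict (unique_chain_missing_res missing_res_dict)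

-- ===== LEMMAS AND PROOFS =====

-- join helper at the char level, and the shape of B's joined keys
def ucmrJ (cs : List String) : String := PySem.Str.join "," cs
def ucmrF (p : String × List String) : String × String := (ucmrJ p.2, p.1)

def ucmrJoinC : List (List Char) → List Char
  | [] => []
  | [x] => x
  | x :: y :: r => x ++ ',' :: ucmrJoinC (y :: r)

lemma intercalate_joinC : ∀ xs : List (List Char), List.intercalate [','] xs = ucmrJoinC xs
  | [] => by simp [List.intercalate, ucmrJoinC]
  | [x] => by simp [List.intercalate, ucmrJoinC]
  | x :: y :: r => by
      have ih := intercalate_joinC (y :: r)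
      simp [List.intercalate, List.intersperse, ucmrJoinC] at ih ⊢
      simpa using ih

lemma str_ext {s t : String} (h : s.toList = t.toList) : s = t := by
  have := congrArg String.ofList h
  simpa [String.ofList_toList] using this

lemma comma_toList : ("," : String).toList = [','] := by decide

lemma ucmrJ_toList (cs : List String) :
    (ucmrJ cs).toList = ucmrJoinC (cs.map String.toList) := by
  simp [ucmrJ, PySem.Str.join, PySem.Chars.join, String.toList_ofList, comma_toList,
    intercalate_joinC]

lemma cancelComma (x : List Char) : ∀ y u v : List Char, ',' ∉ x → ',' ∉ y →
    x ++ ',' :: u = y ++ ',' :: v → x = y ∧ u = v := by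
  induction x with
  | nil =>
    intro y u v _ hy h
    cases y with
    | nil => simpa using h
    | cons b ys =>
      simp only [List.nil_append, List.cons_append, List.cons.injEq] at h
      exact absurd (h.1 ▸ List.mem_cons_self) hy
  | cons a xs ih =>
    intro y u v hx hy h
    cases y with
    | nil =>
      simp only [List.nil_append, List.cons_append, List.cons.injEq] at h
      exact absurd (h.1 ▸ List.mem_cons_self) hx
    | cons b ys =>
      simp only [List.cons_append, List.cons.injEq] at h
      have := ih ys u v (fun hm => hx (List.mem_cons_of_mem _ hm))
        (fun hm => hy (List.mem_cons_of_mem _ hm)) h.2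
      exact ⟨by simp [h.1, this.1], this.2⟩

lemma comma_mem_joinC (x y : List Char) (r : List (List Char)) :
    ',' ∈ ucmrJoinC (x :: y :: r) := by
  simp [ucmrJoinC]

lemma joinC_inj : ∀ xs ys : List (List Char), (∀ x ∈ xs, ',' ∉ x) → (∀ y ∈ ys, ',' ∉ y) →
    xs ≠ [] → ys ≠ [] → ucmrJoinC xs = ucmrJoinC ys → xs = ys
  | [], _, _, _, hne, _, _ => absurd rfl hne
  | _ :: _, [], _, _, _, hne, _ => absurd rfl hne
  | [x], [y], _, _, _, _, h => by simpa [ucmrJoinC] using h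
  | [x], y1 :: y2 :: r, hx, _, _, _, h => by
      have hm := comma_mem_joinC y1 y2 r
      rw [← h] at hm
      exact absurd hm (hx x (by simp))
  | x1 :: x2 :: r, [y], _, hy, _, _, h => by
      have hm := comma_mem_joinC x1 x2 r
      rw [h] at hm
      exact absurd hm (hy y (by simp))
  | x1 :: x2 :: r, y1 :: y2 :: s, hx, hy, _, _, h => by
      simp only [ucmrJoinC] at h
      have hc := cancelComma x1 y1 (ucmrJoinC (x2 :: r)) (ucmrJoinC (y2 :: s))
        (hx x1 (by simp)) (hy y1 (by simp)) h
      have ht := joinC_inj (x2 :: r) (y2 :: s)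
        (fun z hz => hx z (List.mem_cons_of_mem _ hz))
        (fun z hz => hy z (List.mem_cons_of_mem _ hz))
        (by simp) (by simp) hc.2
      simp [hc.1, ht]

lemma joinC_append : ∀ (xs : List (List Char)) (y : List Char), xs ≠ [] →
    ucmrJoinC (xs ++ [y]) = ucmrJoinC xs ++ ',' :: y
  | [], _, hne => absurd rfl hne
  | [x], y, _ => rfl
  | x1 :: x2 :: r, y, _ => by
      have ih := joinC_append (x2 :: r) y (by simp)
      simp only [List.cons_append, ucmrJoinC] at ih ⊢
      simp [ih]

lemma ucmrJ_singleton (c : String) : ucmrJ [c] = c :=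
  str_ext (by simp [ucmrJ_toList, ucmrJoinC])

lemma ucmrJ_append (cs : List String) (c : String) (h : cs ≠ []) :
    ucmrJ (cs ++ [c]) = ucmrJ cs ++ "," ++ c := by
  refine str_ext ?_
  have hmne : cs.map String.toList ≠ [] := by simpa using h
  simp [ucmrJ_toList, String.toList_append, comma_toList, joinC_append _ _ hmne]

lemma toList_injective : Function.Injective String.toList := fun _ _ h => str_ext h

lemma ucmrJ_inj {cs ds : List String} (hc : ∀ c ∈ cs, ',' ∉ c.toList)
    (hd : ∀ c ∈ ds, ',' ∉ c.toList) (hcne : cs ≠ []) (hdne : ds ≠ [])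
    (h : ucmrJ cs = ucmrJ ds) : cs = ds := by
  have h' : ucmrJoinC (cs.map String.toList) = ucmrJoinC (ds.map String.toList) := by
    have := congrArg String.toList h
    simpa [ucmrJ_toList] using this
  have := joinC_inj (cs.map String.toList) (ds.map String.toList)
    (by intro x hx; obtain ⟨c, hc', rfl⟩ := List.mem_map.1 hx; exact hc c hc')
    (by intro x hx; obtain ⟨c, hc', rfl⟩ := List.mem_map.1 hx; exact hd c hc')
    (by simpa using hcne) (by simpa using hdne) h'
  exact (List.map_injective_iff.2 toList_injective) this

lemma comma_mem_ucmrJ (c1 c2 : String) (r : List String) :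
    ',' ∈ (ucmrJ (c1 :: c2 :: r)).toList := by
  rw [ucmrJ_toList]
  exact comma_mem_joinC _ _ _

-- generic association-list lemmas
lemma keyUnique {α : Type} {L : List (String × α)} (hnd : (L.map Prod.fst).Nodup)
    {p q : String × α} (hp : p ∈ L) (hq : q ∈ L) (h : p.1 = q.1) : p = q :=
  List.inj_on_of_nodup_map hnd hp hq h

lemma filter_key {α : Type} : ∀ (L : List (String × α)), (L.map Prod.fst).Nodup →
    ∀ m cs, (m, cs) ∈ L → L.filter (fun q => q.1 == m) = [(m, cs)] := by
  intro L
  induction L with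
  | nil => intro _ m cs h; simp at h
  | cons a t ih =>
    intro hnd m cs hmem
    have hnd' : (t.map Prod.fst).Nodup := (List.nodup_cons.1 hnd).2
    rcases List.mem_cons.1 hmem with h | h
    · subst h
      have hrest : t.filter (fun q => q.1 == m) = [] := by
        refine List.filter_eq_nil_iff.2 (fun q hq => ?_)
        have hq1 : q.1 ∈ t.map Prod.fst := List.mem_map_of_mem (f := Prod.fst) hq
        have : q.1 ≠ m := by
          intro he
          exact (List.nodup_cons.1 hnd).1 (he ▸ hq1)
        simpa using this
      simp [hrest]
    · have hne : a.1 ≠ m := by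
        intro he
        exact (List.nodup_cons.1 hnd).1 (he ▸ (List.mem_map_of_mem h))
      simp [hne, ih hnd' m cs h]

-- group invariant maintained by B's loop
def ucmrInv (G : List (String × List String)) : Prop :=
  (G.map Prod.fst).Nodup ∧ (∀ p ∈ G, p.2 ≠ []) ∧
  (∀ p ∈ G, ∀ c ∈ p.2, ',' ∉ c.toList) ∧ (G.flatMap Prod.snd).Nodup

lemma snd_nodup {G : List (String × List String)} (hne : ∀ p ∈ G, p.2 ≠ [])
    (hflat : (G.flatMap Prod.snd).Nodup) : (G.map Prod.snd).Nodup := by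
  induction G with
  | nil => simp
  | cons a t ih =>
    simp only [List.flatMap_cons, List.nodup_append] at hflat
    refine List.nodup_cons.2 ⟨?_, ih (fun p hp => hne p (List.mem_cons_of_mem _ hp)) hflat.2.1⟩
    intro hmem
    obtain ⟨b, hb, hba⟩ := List.mem_map.1 hmem
    obtain ⟨x, hx⟩ := List.exists_mem_of_ne_nil _ (hne a List.mem_cons_self)
    have hxb : x ∈ b.2 := by rw [hba]; exact hx
    exact hflat.2.2 x hx x (List.mem_flatMap.2 ⟨b, hb, hxb⟩) rfl

lemma ucmrJ_inj_on {G : List (String × List String)} (hInv : ucmrInv G) :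
    ∀ p ∈ G, ∀ q ∈ G, ucmrJ p.2 = ucmrJ q.2 → p = q := by
  obtain ⟨hk, hne, hcf, hflat⟩ := hInv
  intro p hp q hq h
  have h2 : p.2 = q.2 :=
    ucmrJ_inj (hcf p hp) (hcf q hq) (hne p hp) (hne q hq) h
  exact List.inj_on_of_nodup_map (snd_nodup hne hflat) hp hq h2

lemma mapped_keys_nodup {G : List (String × List String)} (hInv : ucmrInv G) :
    (G.map (fun p => ucmrJ p.2)).Nodup := by
  obtain ⟨hk, hne, hcf, hflat⟩ := hInv
  have : G.map (fun p => ucmrJ p.2) = (G.map Prod.snd).map ucmrJ := by simp [List.map_map]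
  rw [this]
  refine (List.nodup_map_iff_inj_on (snd_nodup hne hflat)).2 ?_
  intro x hx y hy hxy
  obtain ⟨p, hp, rfl⟩ := List.mem_map.1 hx
  obtain ⟨q, hq, rfl⟩ := List.mem_map.1 hy
  exact congrArg Prod.snd (ucmrJ_inj_on ⟨hk, hne, hcf, hflat⟩ p hp q hq hxy)

-- one loop step, fresh value: both sides append
lemma stepFresh (G : List (String × List String)) (c m : String)
    (hInv : ucmrInv G) (hm : m ∉ G.map Prod.fst)
    (hc : c ∉ G.flatMap Prod.snd) (hccf : ',' ∉ c.toList) :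
    ucmrStepB (PySem.Dict.mk G) (c, m) = PySem.Dict.mk (G ++ [(m, [c])]) ∧
    ucmrStepA (PySem.Dict.mk (G.map ucmrF)) (c, m)
      = PySem.Dict.mk ((G ++ [(m, [c])]).map ucmrF) := by
  obtain ⟨hk, hne, hcf, hflat⟩ := hInv
  constructor
  · -- B side
    have hget : (PySem.Dict.mk G).get? m = none := by
      simp only [PySem.Dict.get?]
      rw [List.find?_eq_none.2 (fun q hq => by
        simp only [beq_iff_eq]
        intro he; exact hm (he ▸ List.mem_map_of_mem (f := Prod.fst) hq))]
      rfl
    have herase : (PySem.Dict.mk G).erase m = PySem.Dict.mk G := by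
      simp only [PySem.Dict.erase]
      congr 1
      refine List.filter_eq_self.2 (fun q hq => ?_)
      simp only [Bool.not_eq_eq_eq_not, Bool.not_true, beq_eq_false_iff_ne, ne_eq]
      intro he; exact hm (he ▸ List.mem_map_of_mem (f := Prod.fst) hq)
    have hcont : (PySem.Dict.mk G).contains m = false := by
      simp only [PySem.Dict.contains]
      refine List.any_eq_false.2 (fun q hq => ?_)
      have : q.1 ≠ m := fun he => hm (he ▸ List.mem_map_of_mem (f := Prod.fst) hq)
      simpa using this
    simp [ucmrStepB, PySem.Dict.getD, hget, herase, PySem.Dict.insert, hcont]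
  · -- A side
    have hvals : (PySem.Dict.mk (G.map ucmrF)).values = G.map Prod.fst := by
      simp [PySem.Dict.values, List.map_map, ucmrF, Function.comp_def]
    have hnotval : (c, m).2 ∉ (PySem.Dict.mk (G.map ucmrF)).values := by
      rw [hvals]; exact hm
    have hkeyne : ∀ p ∈ G, ucmrJ p.2 ≠ c := by
      intro p hp he
      match hp2 : p.2, hne p hp with
      | [x], _ =>
        rw [hp2, ucmrJ_singleton] at he
        exact hc (he ▸ List.mem_flatMap.2 ⟨p, hp, by rw [hp2]; simp⟩)
      | x :: y :: r, _ =>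
        have := comma_mem_ucmrJ x y r
        rw [← hp2, he] at this
        exact hccf this
    have hcont : (PySem.Dict.mk (G.map ucmrF)).contains c = false := by
      simp only [PySem.Dict.contains]
      refine List.any_eq_false.2 (fun q hq => ?_)
      obtain ⟨p, hp, rfl⟩ := List.mem_map.1 hq
      simpa [ucmrF] using hkeyne p hp
    rw [ucmrStepA, if_neg hnotval]
    simp [PySem.Dict.insert, hcont, ucmrF, ucmrJ_singleton]

-- one loop step, repeated value: both sides pop the matching entry and append the merged one
lemma stepMerge (G : List (String × List String)) (c m : String) (cs : List String)
    (hInv : ucmrInv G) (hmem : (m, cs) ∈ G)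
    (hc : c ∉ G.flatMap Prod.snd) (hccf : ',' ∉ c.toList) :
    ucmrStepB (PySem.Dict.mk G) (c, m)
      = PySem.Dict.mk (G.filter (fun q => !(q.1 == m)) ++ [(m, cs ++ [c])]) ∧
    ucmrStepA (PySem.Dict.mk (G.map ucmrF)) (c, m)
      = PySem.Dict.mk ((G.filter (fun q => !(q.1 == m)) ++ [(m, cs ++ [c])]).map ucmrF) := by
  obtain ⟨hk, hne, hcf, hflat⟩ := hInv
  have hcsne : cs ≠ [] := hne (m, cs) hmem
  have hcscf : ∀ x ∈ cs, ',' ∉ x.toList := hcf (m, cs) hmem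
  have hcontf : ∀ q ∈ G.filter (fun q => !(q.1 == m)), q.1 ≠ m := by
    intro q hq
    have := (List.mem_filter.1 hq).2
    simpa using this
  constructor
  · -- B side
    have hget : (PySem.Dict.mk G).get? m = some cs :=
      PySem.Dict.get?_of_mem_items (d := PySem.Dict.mk G) (k := m) (v := cs) hmem hk
    have hcont : (PySem.Dict.mk (G.filter (fun q => !(q.1 == m)))).contains m = false := by
      simp only [PySem.Dict.contains]
      refine List.any_eq_false.2 (fun q hq => by simpa using hcontf q hq)
    simp [ucmrStepB, PySem.Dict.getD, hget, PySem.Dict.erase, PySem.Dict.insert, hcont]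
  · -- A side
    have hval : (c, m).2 ∈ (PySem.Dict.mk (G.map ucmrF)).values := by
      simp only [PySem.Dict.values, List.map_map]
      exact List.mem_map.2 ⟨(m, cs), hmem, rfl⟩
    have hfiltermap : (G.map ucmrF).filter (fun q => q.2 == (c, m).2)
        = [(ucmrJ cs, m)] := by
      rw [List.filter_map]
      have : (fun q => q.2 == (c, m).2) ∘ ucmrF = fun p => p.1 == m := rfl
      rw [this, filter_key G hk m cs hmem]
      rfl
    have hkeysnd : (PySem.Dict.mk (G.map ucmrF)).keys.Nodup := by
      have : (PySem.Dict.mk (G.map ucmrF)).keys = G.map (fun p => ucmrJ p.2) := by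
        simp [PySem.Dict.keys, List.map_map, ucmrF, Function.comp_def]
      rw [this]
      exact mapped_keys_nodup ⟨hk, hne, hcf, hflat⟩
    have hget : (PySem.Dict.mk (G.map ucmrF)).get? (ucmrJ cs) = some m :=
      PySem.Dict.get?_of_mem_items (d := PySem.Dict.mk (G.map ucmrF)) (k := ucmrJ cs) (v := m)
        (List.mem_map.2 ⟨(m, cs), hmem, rfl⟩) hkeysnd
    have herase : (G.map ucmrF).filter (fun q => !(q.1 == ucmrJ cs))
        = (G.filter (fun q => !(q.1 == m))).map ucmrF := by
      rw [List.filter_map]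
      congr 1
      refine List.filter_congr (fun p hp => ?_)
      simp only [Function.comp_def, ucmrF]
      by_cases h : p.1 = m
      · have hpm : p = (m, cs) := keyUnique hk hp hmem h
        simp [hpm]
      · have hne2 : ucmrJ p.2 ≠ ucmrJ cs := fun hj =>
          h (congrArg Prod.fst (ucmrJ_inj_on ⟨hk, hne, hcf, hflat⟩ p hp (m, cs) hmem hj))
        simp [h, hne2]
    have hnewkey : ucmrJ cs ++ "," ++ c = ucmrJ (cs ++ [c]) := (ucmrJ_append cs c hcsne).symm
    have hcont2 : (PySem.Dict.mk ((G.filter (fun q => !(q.1 == m))).map ucmrF)).contains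
        (ucmrJ (cs ++ [c])) = false := by
      simp only [PySem.Dict.contains]
      refine List.any_eq_false.2 (fun q hq => ?_)
      obtain ⟨p, hp, rfl⟩ := List.mem_map.1 hq
      have hpG : p ∈ G := List.mem_of_mem_filter hp
      simp only [ucmrF, ne_eq]
      intro he'
      have he : ucmrJ p.2 = ucmrJ (cs ++ [c]) := eq_of_beq he' 
      have : p.2 = cs ++ [c] :=
        ucmrJ_inj (hcf p hpG) (fun x hx => by
            rcases List.mem_append.1 hx with h | h
            · exact hcscf x h
            · simp at h; exact h ▸ hccf)
          (hne p hpG) (by simp) he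
      exact hc (List.mem_flatMap.2 ⟨p, hpG, by rw [this]; simp⟩)
    rw [ucmrStepA, if_pos hval]
    simp only [hfiltermap, List.head?_cons, PySem.Dict.pop?, hget,
      Option.map_some]
    simp only [PySem.Dict.erase, herase]
    rw [PySem.Dict.insert, if_neg (by rw [hnewkey, hcont2]; simp)]
    simp [ucmrF, hnewkey]

-- invariant preservation, fresh case
lemma invFresh {G : List (String × List String)} {c m : String}
    (hInv : ucmrInv G) (hm : m ∉ G.map Prod.fst)
    (hc : c ∉ G.flatMap Prod.snd) (hccf : ',' ∉ c.toList) :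
    ucmrInv (G ++ [(m, [c])]) ∧
    (G ++ [(m, [c])]).flatMap Prod.snd = G.flatMap Prod.snd ++ [c] := by
  obtain ⟨hk, hne, hcf, hflat⟩ := hInv
  have hflat' : (G ++ [(m, [c])]).flatMap Prod.snd = G.flatMap Prod.snd ++ [c] := by simp
  refine ⟨⟨?_, ?_, ?_, ?_⟩, hflat'⟩
  · rw [List.map_append, List.nodup_append]
    refine ⟨hk, by simp, ?_⟩
    intro x hx y hy
    simp only [List.map_cons, List.map_nil, List.mem_cons, List.not_mem_nil, or_false] at hy
    subst hy
    rintro rfl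
    exact hm hx
  · intro p hp
    rcases List.mem_append.1 hp with h | h
    · exact hne p h
    · simp at h; simp [h]
  · intro p hp x hx
    rcases List.mem_append.1 hp with h | h
    · exact hcf p h x hx
    · simp at h; rw [h] at hx; simp at hx; exact hx ▸ hccf
  · rw [hflat']
    rw [List.nodup_append]
    refine ⟨hflat, by simp, ?_⟩
    intro x hx y hy
    simp only [List.mem_cons, List.not_mem_nil, or_false] at hy
    subst hy
    rintro rfl
    exact hc hx

-- invariant preservation, merge case
lemma invMerge {G : List (String × List String)} {c m : String} {cs : List String}
    (hInv : ucmrInv G) (hmem : (m, cs) ∈ G)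
    (hc : c ∉ G.flatMap Prod.snd) (hccf : ',' ∉ c.toList) :
    ucmrInv (G.filter (fun q => !(q.1 == m)) ++ [(m, cs ++ [c])]) ∧
    ((G.filter (fun q => !(q.1 == m)) ++ [(m, cs ++ [c])]).flatMap Prod.snd).Perm
      (G.flatMap Prod.snd ++ [c]) := by
  obtain ⟨hk, hne, hcf, hflat⟩ := hInv
  set Gf := G.filter (fun q => !(q.1 == m)) with hGf
  have hsub : Gf.Sublist G := List.filter_sublist
  have hperm : (Gf ++ [(m, cs)]).Perm G := by
    have h1 := List.filter_append_perm (fun q => !(q.1 == m)) G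
    have h2 : G.filter (fun q => !!(q.1 == m)) = G.filter (fun q => q.1 == m) := by
      simp only [Bool.not_not]
    rw [h2, filter_key G hk m cs hmem] at h1
    exact h1
  have hpermflat : (Gf.flatMap Prod.snd ++ cs).Perm (G.flatMap Prod.snd) := by
    have := List.Perm.flatMap_right Prod.snd hperm
    simpa using this
  have hflatperm : ((Gf ++ [(m, cs ++ [c])]).flatMap Prod.snd).Perm
      (G.flatMap Prod.snd ++ [c]) := by
    have h3 : (Gf ++ [(m, cs ++ [c])]).flatMap Prod.snd
        = (Gf.flatMap Prod.snd ++ cs) ++ [c] := by simp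
    rw [h3]
    exact hpermflat.append_right [c]
  refine ⟨⟨?_, ?_, ?_, ?_⟩, hflatperm⟩
  · have hGfk : (Gf.map Prod.fst).Nodup := (hsub.map Prod.fst).nodup hk
    have hmnot : m ∉ Gf.map Prod.fst := by
      intro hmm
      obtain ⟨q, hq, hq1⟩ := List.mem_map.1 hmm
      have := (List.mem_filter.1 hq).2
      simp [hq1] at this
    rw [List.map_append, List.nodup_append]
    refine ⟨hGfk, by simp, ?_⟩
    intro x hx y hy
    simp only [List.map_cons, List.map_nil, List.mem_cons, List.not_mem_nil, or_false] at hy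
    subst hy
    rintro rfl
    exact hmnot hx
  · intro p hp
    rcases List.mem_append.1 hp with h | h
    · exact hne p (List.mem_of_mem_filter h)
    · simp at h; simp [h]
  · intro p hp x hx
    rcases List.mem_append.1 hp with h | h
    · exact hcf p (List.mem_of_mem_filter h) x hx
    · simp at h
      rw [h] at hx
      rcases List.mem_append.1 hx with h' | h'
      · exact hcf (m, cs) hmem x h'
      · simp at h'; exact h' ▸ hccf
  · rw [hflatperm.nodup_iff]
    rw [List.nodup_append]
    refine ⟨hflat, by simp, ?_⟩
    intro x hx y hy
    simp only [List.mem_cons, List.not_mem_nil, or_false] at hy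
    subst hy
    rintro rfl
    exact hc hx

-- the main loop invariant: A's dict is the image of B's grouping dict under ucmrF
lemma ucmr_main : ∀ (l : List (String × String)) (G : List (String × List String)),
    ucmrInv G →
    (l.map Prod.fst).Nodup → (∀ p ∈ l, ',' ∉ p.1.toList) →
    (∀ p ∈ l, p.1 ∉ G.flatMap Prod.snd) →
    ucmrInv ((l.foldl ucmrStepB (PySem.Dict.mk G)).items) ∧
    (l.foldl ucmrStepA (PySem.Dict.mk (G.map ucmrF))).items
      = ((l.foldl ucmrStepB (PySem.Dict.mk G)).items).map ucmrF := by
  intro l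
  induction l with
  | nil => intro G hInv _ _ _; exact ⟨hInv, rfl⟩
  | cons p t ih =>
    intro G hInv hlnd hlcf hdisj
    have hccf : ',' ∉ p.1.toList := hlcf p List.mem_cons_self
    have hcflat : p.1 ∉ G.flatMap Prod.snd := hdisj p List.mem_cons_self
    have hlnd' : (p.1 :: t.map Prod.fst).Nodup := by simpa using hlnd
    have htnd : (t.map Prod.fst).Nodup := (List.nodup_cons.1 hlnd').2
    have hp1t : p.1 ∉ t.map Prod.fst := (List.nodup_cons.1 hlnd').1
    have htcf : ∀ q ∈ t, ',' ∉ q.1.toList := fun q hq => hlcf q (List.mem_cons_of_mem _ hq)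
    simp only [List.foldl_cons]
    by_cases hm : p.2 ∈ G.map Prod.fst
    · -- merge case
      obtain ⟨q, hq, hq1⟩ := List.mem_map.1 hm
      have hmem : (p.2, q.2) ∈ G := by
        have : q = (p.2, q.2) := by rw [← hq1]
        rwa [← this]
      obtain ⟨hB, hA⟩ := stepMerge G p.1 p.2 q.2 hInv hmem hcflat hccf
      have hA' : ucmrStepA (PySem.Dict.mk (G.map ucmrF)) p
          = PySem.Dict.mk ((G.filter (fun r => !(r.1 == p.2)) ++ [(p.2, q.2 ++ [p.1])]).map ucmrF) := by
        rw [show p = (p.1, p.2) from rfl]; exact hA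
      have hB' : ucmrStepB (PySem.Dict.mk G) p
          = PySem.Dict.mk (G.filter (fun r => !(r.1 == p.2)) ++ [(p.2, q.2 ++ [p.1])]) := by
        rw [show p = (p.1, p.2) from rfl]; exact hB
      obtain ⟨hInv', hflatperm⟩ := invMerge hInv hmem hcflat hccf
      have hdisj' : ∀ r ∈ t, r.1 ∉ (G.filter (fun s => !(s.1 == p.2)) ++ [(p.2, q.2 ++ [p.1])]).flatMap Prod.snd := by
        intro r hr hmem'
        have := hflatperm.mem_iff.1 hmem'
        rcases List.mem_append.1 this with h | h
        · exact hdisj r (List.mem_cons_of_mem _ hr) h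
        · simp at h
          exact hp1t (h ▸ List.mem_map_of_mem (f := Prod.fst) hr)
      rw [hA', hB']
      exact ih _ hInv' htnd htcf hdisj'
    · -- fresh case
      obtain ⟨hB, hA⟩ := stepFresh G p.1 p.2 hInv hm hcflat hccf
      have hA' : ucmrStepA (PySem.Dict.mk (G.map ucmrF)) p
          = PySem.Dict.mk ((G ++ [(p.2, [p.1])]).map ucmrF) := by
        rw [show p = (p.1, p.2) from rfl]; exact hA
      have hB' : ucmrStepB (PySem.Dict.mk G) p
          = PySem.Dict.mk (G ++ [(p.2, [p.1])]) := by
        rw [show p = (p.1, p.2) from rfl]; exact hB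
      obtain ⟨hInv', hflat'⟩ := invFresh hInv hm hcflat hccf
      have hdisj' : ∀ r ∈ t, r.1 ∉ (G ++ [(p.2, [p.1])]).flatMap Prod.snd := by
        intro r hr hmem'
        rw [hflat'] at hmem'
        rcases List.mem_append.1 hmem' with h | h
        · exact hdisj r (List.mem_cons_of_mem _ hr) h
        · simp at h
          exact hp1t (h ▸ List.mem_map_of_mem (f := Prod.fst) hr)
      rw [hA', hB']
      exact ih _ hInv' htnd htcf hdisj'

-- the all-values-distinct branch: A never merges, B's groups are singletons
lemma distinctA : ∀ (l D : List (String × String)),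
    ((D ++ l).map Prod.fst).Nodup → ((D ++ l).map Prod.snd).Nodup →
    (l.foldl ucmrStepA (PySem.Dict.mk D)).items = D ++ l := by
  intro l
  induction l with
  | nil => intro D _ _; simp
  | cons p t ih =>
    intro D hk hv
    have hreassoc : D ++ p :: t = (D ++ [p]) ++ t := by simp
    have hk' : (((D ++ [p]) ++ t).map Prod.fst).Nodup := by rwa [← hreassoc]
    have hv' : (((D ++ [p]) ++ t).map Prod.snd).Nodup := by rwa [← hreassoc]
    have hvalfresh : p.2 ∉ D.map Prod.snd := by
      have := hv
      rw [List.map_append, List.nodup_append] at this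
      intro hmem
      exact this.2.2 p.2 hmem p.2 (by simp) rfl
    have hkeyfresh : p.1 ∉ D.map Prod.fst := by
      have := hk
      rw [List.map_append, List.nodup_append] at this
      intro hmem
      exact this.2.2 p.1 hmem p.1 (by simp) rfl
    have hstep : ucmrStepA (PySem.Dict.mk D) p = PySem.Dict.mk (D ++ [p]) := by
      rw [ucmrStepA, if_neg (by
        simp only [PySem.Dict.values]
        exact hvalfresh)]
      rw [PySem.Dict.insert, if_neg (by
        simp only [PySem.Dict.contains]
        rw [List.any_eq_false.2 (fun q hq => by
          have : q.1 ≠ p.1 := fun he => hkeyfresh (he ▸ List.mem_map_of_mem (f := Prod.fst) hq)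
          simpa using this)]
        simp)]
    rw [List.foldl_cons, hstep, hreassoc]
    exact ih (D ++ [p]) hk' hv'

lemma distinctB : ∀ (l D : List (String × String)),
    ((D ++ l).map Prod.snd).Nodup →
    (l.foldl ucmrStepB (PySem.Dict.mk (D.map (fun q => (q.2, [q.1]))))).items
      = ((D ++ l).map (fun q => (q.2, [q.1]))) := by
  intro l
  induction l with
  | nil => intro D _; simp
  | cons p t ih =>
    intro D hv
    have hreassoc : D ++ p :: t = (D ++ [p]) ++ t := by simp
    have hv' : (((D ++ [p]) ++ t).map Prod.snd).Nodup := by rwa [← hreassoc]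
    have hvalfresh : p.2 ∉ D.map Prod.snd := by
      have := hv
      rw [List.map_append, List.nodup_append] at this
      intro hmem
      exact this.2.2 p.2 hmem p.2 (by simp) rfl
    have hkeyne : ∀ q ∈ D.map (fun q => (q.2, [q.1])), q.1 ≠ p.2 := by
      intro q hq he
      obtain ⟨r, hr, rfl⟩ := List.mem_map.1 hq
      exact hvalfresh (he ▸ List.mem_map_of_mem (f := Prod.snd) hr)
    have hstep : ucmrStepB (PySem.Dict.mk (D.map (fun q => (q.2, [q.1])))) p
        = PySem.Dict.mk ((D ++ [p]).map (fun q => (q.2, [q.1]))) := by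
      have hget : (PySem.Dict.mk (D.map (fun q => (q.2, [q.1])))).get? p.2 = none := by
        simp only [PySem.Dict.get?]
        rw [List.find?_eq_none.2 (fun q hq => by simpa using hkeyne q hq)]
        rfl
      have herase : (PySem.Dict.mk (D.map (fun q => (q.2, [q.1])))).erase p.2
          = PySem.Dict.mk (D.map (fun q => (q.2, [q.1]))) := by
        simp only [PySem.Dict.erase]
        congr 1
        refine List.filter_eq_self.2 (fun q hq => by simpa using hkeyne q hq)
      have hcont : (PySem.Dict.mk (D.map (fun q => (q.2, [q.1])))).contains p.2 = false := by
        simp only [PySem.Dict.contains]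
        exact List.any_eq_false.2 (fun q hq => by simpa using hkeyne q hq)
      simp [ucmrStepB, PySem.Dict.getD, hget, herase, PySem.Dict.insert, hcont]
    rw [List.foldl_cons, hstep, hreassoc]
    exact ih (D ++ [p]) hv'

-- ===== VERDICT (by name: the statement is the Claim_ definition above) =====
theorem unique_chain_missing_res_spec : Claim_equal_unique_chain_missing_res := by
  unfold Claim_equal_unique_chain_missing_res
  intro l _ hpre
  unfold Spec_unique_chain_missing_res
  obtain ⟨hnd, hbranch⟩ := hpre
  rw [unique_chain_missing_res, unique_chain_missing_res_alt]
  rw [show (PySem.Dict.empty : PySem.Dict String String) = PySem.Dict.mk [] from rfl,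
    show (PySem.Dict.empty : PySem.Dict String (List String)) = PySem.Dict.mk [] from rfl]
  rcases hbranch with hcf | hvnd
  · -- comma-free chains: the grouping invariant
    have hInv0 : ucmrInv ([] : List (String × List String)) := by
      refine ⟨by simp, by simp, by simp, by simp⟩
    obtain ⟨hInvF, heq⟩ := ucmr_main l [] hInv0 hnd (fun p hp => hcf p hp) (by simp)
    rw [show (([] : List (String × List String)).map ucmrF) = [] from rfl] at heq
    rw [heq]
    set GF := (l.foldl ucmrStepB (PySem.Dict.mk [])).items with hGF
    have hfresh : ∀ a ∈ GF, (PySem.Dict.empty : PySem.Dict String String).contains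
        (PySem.Str.join "," a.2) = false := by
      intro a _; rfl
    have hknd : (GF.map (fun a => PySem.Str.join "," a.2)).Nodup := mapped_keys_nodup hInvF
    have hfold' : (List.foldl (fun d q => d.insert (PySem.Str.join "," q.2) q.1)
        (PySem.Dict.mk []) GF).items
        = ([] : List (String × String)) ++ GF.map (fun a => (PySem.Str.join "," a.2, a.1)) :=
      PySem.Dict.items_foldl_insert_fresh GF (fun a => PySem.Str.join "," a.2)
        (fun a => a.1) PySem.Dict.empty hfresh hknd
    rw [hfold']
    simp [ucmrF, ucmrJ]
  · -- all missing_res values distinct: both sides return the input unchanged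
    have hA : (l.foldl ucmrStepA (PySem.Dict.mk [])).items = l := by
      have := distinctA l [] (by simpa using hnd) (by simpa using hvnd)
      simpa using this
    have hB : (l.foldl ucmrStepB (PySem.Dict.mk [])).items
        = l.map (fun q => (q.2, [q.1])) := by
      have := distinctB l [] (by simpa using hvnd)
      simpa using this
    rw [hA, hB]
    set GF := l.map (fun q => (q.2, [q.1])) with hGF
    have hfresh : ∀ a ∈ GF, (PySem.Dict.empty : PySem.Dict String String).contains
        (PySem.Str.join "," a.2) = false := by
      intro a _; rfl
    have hknd : (GF.map (fun a => PySem.Str.join "," a.2)).Nodup := by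
      have hmapeq : GF.map (fun a => PySem.Str.join "," a.2) = l.map Prod.fst := by
        rw [hGF, List.map_map]
        refine List.map_congr_left (fun q _ => ?_)
        exact ucmrJ_singleton q.1
      rw [hmapeq]
      exact hnd
    have hfold' : (List.foldl (fun d q => d.insert (PySem.Str.join "," q.2) q.1)
        (PySem.Dict.mk []) GF).items
        = ([] : List (String × String)) ++ GF.map (fun a => (PySem.Str.join "," a.2, a.1)) :=
      PySem.Dict.items_foldl_insert_fresh GF (fun a => PySem.Str.join "," a.2)
        (fun a => a.1) PySem.Dict.empty hfresh hknd
    rw [hfold']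
    have hid : ∀ q : String × String, (PySem.Str.join "," [q.1], q.2) = q := fun q => by
      rw [show PySem.Str.join "," [q.1] = q.1 from ucmrJ_singleton q.1]
    have hmap : GF.map (fun a => (PySem.Str.join "," a.2, a.1)) = l.map (fun q => q) := by
      rw [hGF, List.map_map]
      exact List.map_congr_left (fun q _ => hid q)
    simp only [List.nil_append]
    rw [hmap]
    simp
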